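-- pv_equiv track=rewrite | github.com/qbalsdon/pico_rgb_keypad_hid | adafruit_circuitpython_libs/adafruit-circuitpython-bundle-py-20210214/lib/adafruit_sgp40.py | _check_crc8
-- ===== SOURCE A (Python) =====
-- def _check_crc8(crc_buffer, crc_value):
--     crc = 0xFF
--     for byte in crc_buffer:
--         crc ^= byte
--         for _ in range(8):
--             if crc & 0x80:
--                 crc = (crc << 1) ^ 0x31
--             else:
--                 crc = crc << 1
--     return crc_value == (crc & 0xFF)  # check against the bottom 8 bits
-- ===== SOURCE B (Python) =====
-- def _crc8_table():
--     table = []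
--     for i in range(256):
--         c = i
--         for _ in range(8):
--             if c & 0x80:
--                 c = ((c << 1) ^ 0x31) & 0xFF
--             else:
--                 c = (c << 1) & 0xFF
--         table.append(c)
--     return table
--
--
-- _CRC8_TABLE = _crc8_table()
--
--
-- def _check_crc8(crc_buffer, crc_value):
--     crc = 0xFF
--     for byte in crc_buffer:
--         crc = _CRC8_TABLE[(crc ^ byte) & 0xFF]
--     return crc_value == crc
-- ===== Notes on version B (the rewrite author's own statement) =====
-- stated objective: faster
-- what changed: B precomputes a 256-entry CRC8 lookup table for polynomial 0x31 once at module load and processes each buffer byte with a single masked table lookup, replacing A's per-byte 8-iteration bit-shift loop; the running crc is kept masked to 8 bits so the final & 0xFF is unnecessary.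
import Mathlib
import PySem

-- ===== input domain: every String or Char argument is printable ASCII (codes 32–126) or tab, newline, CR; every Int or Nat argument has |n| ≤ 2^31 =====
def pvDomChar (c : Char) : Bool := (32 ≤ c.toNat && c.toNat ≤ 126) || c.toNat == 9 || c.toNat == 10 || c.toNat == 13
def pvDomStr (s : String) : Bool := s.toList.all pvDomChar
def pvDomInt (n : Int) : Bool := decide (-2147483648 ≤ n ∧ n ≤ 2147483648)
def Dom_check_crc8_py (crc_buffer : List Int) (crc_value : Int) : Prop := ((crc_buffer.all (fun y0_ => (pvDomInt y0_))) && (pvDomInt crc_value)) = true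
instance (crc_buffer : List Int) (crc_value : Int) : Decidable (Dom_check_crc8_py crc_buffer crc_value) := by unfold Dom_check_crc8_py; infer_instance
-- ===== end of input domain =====

-- B replaces A's per-bit inner loop by a precomputed 256-entry CRC8 table (one lookup per byte); same return value, same init/poly.

-- ===== PORT A =====
-- one iteration of A's inner `for _ in range(8)` body
def crcBit (c : Int) : Int :=
  if PySem.Int.band c 128 ≠ 0 then PySem.Int.bxor (c <<< (1:Nat)) 49 else c <<< (1:Nat)

-- the body of A's outer `for byte in crc_buffer` loop
def crcByteA (crc byte : Int) : Int :=
  (List.range 8).foldl (fun c _ => crcBit c) (PySem.Int.bxor crc byte)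

def check_crc8_py (crc_buffer : List Int) (crc_value : Int) : Bool :=
  decide (crc_value = PySem.Int.band (crc_buffer.foldl crcByteA 255) 255)

-- ===== PORT B =====
-- one iteration of Source B's table-builder inner loop (masked to 8 bits)
def crcBitM (c : Int) : Int :=
  if PySem.Int.band c 128 ≠ 0 then PySem.Int.band (PySem.Int.bxor (c <<< (1:Nat)) 49) 255
  else PySem.Int.band (c <<< (1:Nat)) 255

-- Source B's module-level _CRC8_TABLE (built by appending, as in _crc8_table)
def crc8Table : List Int :=
  (List.range 256).foldl
    (fun table (i : Nat) => table ++ [(List.range 8).foldl (fun c _ => crcBitM c) ((i : Nat) : Int)]) []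

-- the body of Source B's `for byte in crc_buffer` loop; the index is provably in [0,256),
-- so the pyGetD default 0 is never used
def crcByteB (crc byte : Int) : Int :=
  PySem.List.pyGetD crc8Table (PySem.Int.band (PySem.Int.bxor crc byte) 255) 0

def check_crc8_py_alt (crc_buffer : List Int) (crc_value : Int) : Bool :=
  decide (crc_value = crc_buffer.foldl crcByteB 255)

-- ===== PRECONDITION & SPEC =====
def Spec_check_crc8_py (crc_buffer : List Int) (crc_value : Int) (out : Bool) : Prop := out = check_crc8_py_alt crc_buffer crc_value
instance (crc_buffer : List Int) (crc_value : Int) (out : Bool) : Decidable (Spec_check_crc8_py crc_buffer crc_value out) := by unfold Spec_check_crc8_py; infer_instance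

-- ===== CLAIM (what is proved, stated in full; the proofs are below) =====
def Claim_equal_check_crc8_py : Prop := ∀ (crc_buffer : List Int) (crc_value : Int), Dom_check_crc8_py crc_buffer crc_value → Spec_check_crc8_py crc_buffer crc_value (check_crc8_py crc_buffer crc_value)

-- ===== LEMMAS AND PROOFS =====

-- Nat facts about the low 8 bits
theorem nat_and128_mod256 (x : Nat) : x &&& 128 = x % 256 &&& 128 := by
  have h1 : x &&& 128 < 2 ^ 8 := Nat.and_lt_two_pow x (by norm_num)
  have h2 : (x &&& 128) % 2 ^ 8 = x % 2 ^ 8 &&& 128 % 2 ^ 8 := Nat.and_mod_two_pow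
  rw [Nat.mod_eq_of_lt h1] at h2
  norm_num at h2
  exact h2

set_option maxRecDepth 4096 in
theorem nat_xor255 (u : Nat) (h : u < 256) : 255 ^^^ u = 255 - u := by
  have h' : ∀ v : Fin 256, 255 ^^^ (v : Nat) = 255 - (v : Nat) := by decide
  exact h' ⟨u, h⟩

set_option maxRecDepth 4096 in
theorem nat_and128_compl (u : Nat) (h : u < 256) : (255 - u) &&& 128 = 128 - (u &&& 128) := by
  have h' : ∀ v : Fin 256, (255 - (v : Nat)) &&& 128 = 128 - ((v : Nat) &&& 128) := by decide
  exact h' ⟨u, h⟩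

theorem nat_xor_mod (x y : Nat) : (x ^^^ y) % 256 = x % 256 ^^^ y % 256 := by
  have h : (x ^^^ y) % 2 ^ 8 = x % 2 ^ 8 ^^^ y % 2 ^ 8 := Nat.xor_mod_two_pow
  norm_num at h
  exact h

-- xor against the complement of the low byte
theorem nat_compl_xor (u v : Nat) : ((255 - u % 256) ^^^ v) % 256 = 255 - (u ^^^ v) % 256 := by
  have hu : u % 256 < 256 := Nat.mod_lt _ (by norm_num)
  have hv : v % 256 < 256 := Nat.mod_lt _ (by norm_num)
  have hx : u % 256 ^^^ v % 256 < 256 := by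
    have := Nat.xor_lt_two_pow (n := 8) hu hv
    norm_num at this
    exact this
  have hlt : 255 ^^^ u % 256 < 256 := by
    have := Nat.xor_lt_two_pow (n := 8) (by norm_num : (255:Nat) < 2 ^ 8) hu
    norm_num at this
    exact this
  calc ((255 - u % 256) ^^^ v) % 256
      = ((255 ^^^ u % 256) ^^^ v) % 256 := by rw [nat_xor255 _ hu]
    _ = (255 ^^^ u % 256) % 256 ^^^ v % 256 := nat_xor_mod _ _
    _ = (255 ^^^ u % 256) ^^^ v % 256 := by rw [Nat.mod_eq_of_lt hlt]
    _ = 255 ^^^ (u % 256 ^^^ v % 256) := Nat.xor_assoc _ _ _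
    _ = 255 - (u % 256 ^^^ v % 256) := nat_xor255 _ hx
    _ = 255 - (u ^^^ v) % 256 := by rw [nat_xor_mod]

-- PySem.Int.band with 0xFF is reduction mod 256 (Python two's complement)
theorem band255_eq (a : Int) : PySem.Int.band a 255 = a % 256 := by
  have e255 : (255:Int).toNat = 255 := rfl
  simp only [PySem.Int.band]
  by_cases ha : 0 ≤ a
  · rw [if_pos ha, if_pos (by norm_num : (0:Int) ≤ 255), e255]
    have h : a.toNat &&& 255 = a.toNat % 256 := by
      generalize a.toNat = m
      have := Nat.and_two_pow_sub_one_eq_mod m 8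
      norm_num at this
      exact this
    rw [h]
    omega
  · rw [if_neg ha, if_pos (by norm_num : (0:Int) ≤ 255), e255, Nat.and_comm]
    have h : (-a - 1).toNat &&& 255 = (-a - 1).toNat % 256 := by
      generalize (-a - 1).toNat = m
      have := Nat.and_two_pow_sub_one_eq_mod m 8
      norm_num at this
      exact this
    rw [h]
    omega

-- the bit-7 test only depends on the low byte
theorem band128_eq (a : Int) : PySem.Int.band a 128 = PySem.Int.band (a % 256) 128 := by
  have hm0 : 0 ≤ a % 256 := Int.emod_nonneg a (by norm_num)
  have e128 : (128:Int).toNat = 128 := rfl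
  simp only [PySem.Int.band]
  by_cases ha : 0 ≤ a
  · rw [if_pos ha, if_pos (by norm_num : (0:Int) ≤ 128), if_pos hm0,
      if_pos (by norm_num : (0:Int) ≤ 128), e128]
    have ht : (a % 256).toNat = a.toNat % 256 := by omega
    rw [ht, ← nat_and128_mod256]
  · rw [if_neg ha, if_pos (by norm_num : (0:Int) ≤ 128), if_pos hm0,
      if_pos (by norm_num : (0:Int) ≤ 128), e128]
    have ht : (a % 256).toNat = 255 - (-a - 1).toNat % 256 := by omega
    rw [ht, nat_and128_compl _ (by omega), ← nat_and128_mod256, Nat.and_comm 128 ((-a - 1).toNat)]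

-- xor congruence mod 256 in the first argument
theorem bxor_mod (a b : Int) : (PySem.Int.bxor a b) % 256 = (PySem.Int.bxor (a % 256) b) % 256 := by
  have hm0 : 0 ≤ a % 256 := Int.emod_nonneg a (by norm_num)
  simp only [PySem.Int.bxor]
  by_cases ha : 0 ≤ a <;> by_cases hb : 0 ≤ b
  · rw [if_pos ha, if_pos hb, if_pos hm0, if_pos hb]
    have ht : (a % 256).toNat = a.toNat % 256 := by omega
    rw [ht]
    have h : (a.toNat ^^^ b.toNat) % 256 = (a.toNat % 256 ^^^ b.toNat) % 256 := by
      rw [nat_xor_mod, nat_xor_mod, Nat.mod_mod_of_dvd _ (by norm_num)]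
    omega
  · rw [if_pos ha, if_neg hb, if_pos hm0, if_neg hb]
    have ht : (a % 256).toNat = a.toNat % 256 := by omega
    rw [ht]
    have h : (a.toNat ^^^ (-b - 1).toNat) % 256
        = (a.toNat % 256 ^^^ (-b - 1).toNat) % 256 := by
      rw [nat_xor_mod, nat_xor_mod, Nat.mod_mod_of_dvd _ (by norm_num)]
    omega
  · rw [if_neg ha, if_pos hb, if_pos hm0, if_pos hb]
    have ht : (a % 256).toNat = 255 - (-a - 1).toNat % 256 := by omega
    rw [ht]
    have h := nat_compl_xor (-a - 1).toNat b.toNat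
    omega
  · rw [if_neg ha, if_neg hb, if_pos hm0, if_neg hb]
    have ht : (a % 256).toNat = 255 - (-a - 1).toNat % 256 := by omega
    rw [ht]
    have h := nat_compl_xor (-a - 1).toNat (-b - 1).toNat
    have hx : ((-a - 1).toNat ^^^ (-b - 1).toNat) % 256 < 256 := Nat.mod_lt _ (by norm_num)
    omega

theorem shift_one (x : Int) : x <<< (1:Nat) = x * 2 := by
  rw [show (1:Nat) = 0 + 1 from rfl, Int.shiftLeft_succ, Int.shiftLeft_zero]

theorem shift_mod (x : Int) : (x <<< (1:Nat)) % 256 = ((x % 256) <<< (1:Nat)) % 256 := by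
  rw [shift_one, shift_one]
  omega

theorem crcBit_mod {x y : Int} (h : x % 256 = y % 256) : (crcBit x) % 256 = (crcBit y) % 256 := by
  have hb : PySem.Int.band x 128 = PySem.Int.band y 128 := by
    rw [band128_eq, h, ← band128_eq]
  have hs : (x <<< (1:Nat)) % 256 = (y <<< (1:Nat)) % 256 := by
    rw [shift_mod, h, ← shift_mod]
  simp only [crcBit, hb]
  split_ifs with hc
  · calc (PySem.Int.bxor (x <<< (1:Nat)) 49) % 256
        = (PySem.Int.bxor ((x <<< (1:Nat)) % 256) 49) % 256 := bxor_mod _ _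
      _ = (PySem.Int.bxor ((y <<< (1:Nat)) % 256) 49) % 256 := by rw [hs]
      _ = (PySem.Int.bxor (y <<< (1:Nat)) 49) % 256 := (bxor_mod _ _).symm
  · exact hs

theorem crcBitM_eq (x : Int) : crcBitM x = (crcBit x) % 256 := by
  unfold crcBitM crcBit
  split_ifs with hc <;> rw [band255_eq]

theorem fold_mod (l : List Nat) (x : Int) :
    l.foldl (fun c _ => crcBitM c) (x % 256) = (l.foldl (fun c _ => crcBit c) x) % 256 := by
  induction l generalizing x with
  | nil => rfl
  | cons a t ih =>
    simp only [List.foldl_cons]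
    have h1 : crcBitM (x % 256) = (crcBit x) % 256 := by
      rw [crcBitM_eq]
      exact crcBit_mod (by omega)
    rw [h1]
    exact ih (crcBit x)

theorem build_map {α β : Type} (l : List β) (g : β → α) (init : List α) :
    l.foldl (fun acc i => acc ++ [g i]) init = init ++ l.map g := by
  induction l generalizing init with
  | nil => simp
  | cons h t ih => simp [ih]

theorem table_lookup (idx : Int) (h0 : 0 ≤ idx) (h1 : idx < 256) :
    PySem.List.pyGetD crc8Table idx 0 = (List.range 8).foldl (fun c _ => crcBitM c) idx := by
  have htab : crc8Table
      = (List.range 256).map (fun (k : Nat) => (List.range 8).foldl (fun c _ => crcBitM c) ((k : Nat) : Int)) := by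
    unfold crc8Table
    rw [build_map, List.nil_append]
  have hidx : idx = ((idx.toNat : Nat) : Int) := by omega
  have hk : idx.toNat < 256 := by omega
  rw [htab, hidx, PySem.List.pyGetD_natCast]
  rw [List.getD_eq_getElem?_getD, List.getElem?_map, List.getElem?_range hk]
  simp

theorem main_fold (l : List Int) (x y : Int) (h : y = x % 256) :
    l.foldl crcByteB y = (l.foldl crcByteA x) % 256 := by
  induction l generalizing x y with
  | nil => simpa using h
  | cons b t ih =>
    simp only [List.foldl_cons]
    apply ih
    unfold crcByteB crcByteA
    rw [band255_eq]
    have hidx : (PySem.Int.bxor y b) % 256 = (PySem.Int.bxor x b) % 256 := by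
      rw [bxor_mod, h, Int.emod_emod_of_dvd _ (by norm_num), ← bxor_mod]
    rw [hidx, table_lookup _ (Int.emod_nonneg _ (by norm_num)) (Int.emod_lt_of_pos _ (by norm_num))]
    exact fold_mod (List.range 8) (PySem.Int.bxor x b)

-- ===== VERDICT (by name: the statement is the Claim_ definition above) =====
theorem check_crc8_py_spec : Claim_equal_check_crc8_py := by
  intro buf v _
  unfold Spec_check_crc8_py check_crc8_py check_crc8_py_alt
  rw [band255_eq, main_fold buf 255 255 (by decide)]
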